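-- pv_equiv track=rewrite | github.com/ImSwitch/ImSwitch | imswitch/imcontrol/controller/controllers/camera_stage_mapping/scan_coords_times.py | raster
-- ===== SOURCE A (Python) =====
-- def raster(starting_x,starting_y,x_move,y_move,rows,columns):
--     coords_list = []
--     current_location = (starting_x, starting_y)
--     for x in range(0,columns):
--         current_location = tuple((current_location[0], starting_y))
--         coords_list.append(current_location)
--         for y in range(1,rows):
--             current_location = tuple((current_location[0],current_location[1] - y_move))
--             coords_list.append(current_location)
--         current_location = tuple((current_location[0] + x_move,current_location[1]))
--     coords_list.append((starting_x,starting_y))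
--     return(coords_list)
-- ===== SOURCE B (Python) =====
-- def raster(starting_x, starting_y, x_move, y_move, rows, columns):
--     nrows = rows if rows > 1 else 1
--     pts = [(starting_x + c * x_move, starting_y - r * y_move)
--            for c in range(columns) for r in range(nrows)]
--     pts.append((starting_x, starting_y))
--     return pts
-- ===== Notes on version B (the rewrite author's own statement) =====
-- stated objective: simpler
-- what changed: Replaces A's stateful nested accumulator loops (current_location threaded through both loops) with a single closed-form comprehension computing each point directly as (starting_x + c*x_move, starting_y - r*y_move) over the column/row index grid, with the rows<=0 case giving one point per column via max(rows,1).
import Mathlib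
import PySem

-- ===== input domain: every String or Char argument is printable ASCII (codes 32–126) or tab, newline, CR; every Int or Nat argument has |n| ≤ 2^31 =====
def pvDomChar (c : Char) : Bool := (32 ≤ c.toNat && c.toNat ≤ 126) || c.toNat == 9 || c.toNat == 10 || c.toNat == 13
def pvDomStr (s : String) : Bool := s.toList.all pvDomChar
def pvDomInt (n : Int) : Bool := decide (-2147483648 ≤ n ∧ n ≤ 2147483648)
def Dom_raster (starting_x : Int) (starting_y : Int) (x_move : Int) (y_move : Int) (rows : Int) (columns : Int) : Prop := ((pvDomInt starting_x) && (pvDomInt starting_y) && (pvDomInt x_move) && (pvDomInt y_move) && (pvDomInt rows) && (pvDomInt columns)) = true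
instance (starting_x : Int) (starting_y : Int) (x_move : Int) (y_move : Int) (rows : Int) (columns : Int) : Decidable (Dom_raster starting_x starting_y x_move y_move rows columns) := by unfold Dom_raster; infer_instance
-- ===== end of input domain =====

-- B replaces A's stateful nested accumulator loops with a closed-form comprehension over the index grid (objective: simpler).

-- ===== PORT A =====
-- literal transliteration of A: state = (current_location, coords_list), nested folds over range(0,columns) and range(1,rows)
def raster (starting_x : Int) (starting_y : Int) (x_move : Int) (y_move : Int) (rows : Int) (columns : Int) : List (Int × Int) :=
  let s :=
    (PySem.List.pyRange 0 columns 1).foldl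
      (fun (st : (Int × Int) × List (Int × Int)) _ =>
        let cur := (st.1.1, starting_y)
        let cl := st.2 ++ [cur]
        let inner :=
          (PySem.List.pyRange 1 rows 1).foldl
            (fun (st2 : (Int × Int) × List (Int × Int)) _ =>
              let cur2 := (st2.1.1, st2.1.2 - y_move)
              (cur2, st2.2 ++ [cur2]))
            (cur, cl)
        ((inner.1.1 + x_move, inner.1.2), inner.2))
      ((starting_x, starting_y), [])
  s.2 ++ [(starting_x, starting_y)]

-- ===== PORT B =====
-- literal transliteration of B: nrows = rows if rows > 1 else 1; closed-form comprehension; append start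
def raster_alt (starting_x : Int) (starting_y : Int) (x_move : Int) (y_move : Int) (rows : Int) (columns : Int) : List (Int × Int) :=
  let nrows := if rows > 1 then rows else 1
  ((PySem.List.pyRange 0 columns 1).flatMap (fun c =>
      (PySem.List.pyRange 0 nrows 1).map (fun r =>
        (starting_x + c * x_move, starting_y - r * y_move))))
    ++ [(starting_x, starting_y)]

-- ===== PRECONDITION & SPEC =====
def Spec_raster (starting_x : Int) (starting_y : Int) (x_move : Int) (y_move : Int) (rows : Int) (columns : Int) (out : List (Int × Int)) : Prop := out = raster_alt starting_x starting_y x_move y_move rows columns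
instance (starting_x : Int) (starting_y : Int) (x_move : Int) (y_move : Int) (rows : Int) (columns : Int) (out : List (Int × Int)) : Decidable (Spec_raster starting_x starting_y x_move y_move rows columns out) := by unfold Spec_raster; infer_instance

-- ===== CLAIM (what is proved, stated in full; the proofs are below) =====
def Claim_equal_raster : Prop := ∀ (starting_x : Int) (starting_y : Int) (x_move : Int) (y_move : Int) (rows : Int) (columns : Int), Dom_raster starting_x starting_y x_move y_move rows columns → Spec_raster starting_x starting_y x_move y_move rows columns (raster starting_x starting_y x_move y_move rows columns)

-- ===== LEMMAS AND PROOFS =====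

-- ===== LEMMAS AND PROOFS =====
lemma foldl_const_iter {α β : Type} (f : α → α) : ∀ (l : List β) (a : α),
    l.foldl (fun s _ => f s) a = f^[l.length] a := by
  intro l
  induction l with
  | nil => intro a; simp
  | cons b t ih => intro a; simp [List.foldl_cons, ih, Function.iterate_succ_apply]

lemma inner_iter (ym : Int) : ∀ (m : Nat) (x y : Int) (acc : List (Int × Int)),
    (fun (st2 : (Int × Int) × List (Int × Int)) =>
      let cur2 := (st2.1.1, st2.1.2 - ym); (cur2, st2.2 ++ [cur2]))^[m] ((x, y), acc)
    = ((x, y - (m : Int) * ym),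
       acc ++ (List.range m).map (fun r => (x, y - ((r : Int) + 1) * ym))) := by
  intro m
  induction m with
  | zero => intro x y acc; simp
  | succ n ih =>
      intro x y acc
      rw [Function.iterate_succ_apply', ih]
      simp [List.range_succ]
      ring

lemma shift_map {α : Type} (f f1 : Nat → α) (hf : ∀ k, f1 k = f (k + 1)) (m : Nat) :
    f 0 :: (List.range m).map f1 = (List.range m).map f ++ [f m] := by
  induction m with
  | zero => simp
  | succ k ih =>
      rw [List.range_succ, List.map_append, List.map_append, ← List.cons_append, ih]
      simp [hf]

lemma outer_iter (sy xm ym rows : Int) : ∀ (n : Nat) (x y : Int) (acc : List (Int × Int)),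
    (fun (st : (Int × Int) × List (Int × Int)) =>
      let cur := (st.1.1, sy)
      let cl := st.2 ++ [cur]
      let inner :=
        (PySem.List.pyRange 1 rows 1).foldl
          (fun (st2 : (Int × Int) × List (Int × Int)) _ =>
            let cur2 := (st2.1.1, st2.1.2 - ym)
            (cur2, st2.2 ++ [cur2]))
          (cur, cl)
      ((inner.1.1 + xm, inner.1.2), inner.2))^[n] ((x, y), acc)
    = ((x + (n : Int) * xm, if n = 0 then y else sy - (((rows - 1).toNat : Int)) * ym),
       acc ++ (List.range n).flatMap (fun c =>
         (List.range ((rows - 1).toNat + 1)).map (fun r =>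
           (x + (c : Int) * xm, sy - (r : Int) * ym)))) := by
  intro n
  induction n with
  | zero => intro x y acc; simp
  | succ n ih =>
      intro x y acc
      rw [Function.iterate_succ_apply', ih]
      simp only []
      rw [foldl_const_iter, PySem.List.length_pyRange_one, inner_iter]
      simp [List.range_succ, List.flatMap_append]
      refine ⟨by ring, ?_⟩
      simpa [Function.comp, ← List.map_eq_flatMap, List.map_map] using shift_map
        ((fun r : Int => (x + (n : Int) * xm, sy - r * ym)) ∘ Nat.cast)
        ((fun r : Int => (x + (n : Int) * xm, sy - (r + 1) * ym)) ∘ Nat.cast)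
        (by intro k; simp [Function.comp]) (rows.toNat - 1)

-- ===== VERDICT =====
theorem raster_spec : Claim_equal_raster := by
  intro sx sy xm ym rows cols _
  unfold Spec_raster raster raster_alt
  dsimp only
  rw [foldl_const_iter, PySem.List.length_pyRange_one, outer_iter]
  rw [PySem.List.pyRange_one 0 cols, PySem.List.pyRange_one 0 (if rows > 1 then rows else 1)]
  have hn : (if 1 < rows then rows else 1).toNat = rows.toNat - 1 + 1 := by
    split_ifs <;> omega
  simp [hn, ← List.map_eq_flatMap, List.map_map, List.flatMap_map]
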